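-- pv_equiv track=rewrite | github.com/jfr4nc0/serial-job-applier | linkedin_mcp/linkedin/agents/easy_apply_agent.py | _find_best_option_match
-- ===== SOURCE A (Python) =====
-- from typing import Any, Dict, List
--
-- def _find_best_option_match(answer: str, options: List[str]) -> str:
--     """Find the best matching option from available choices."""
--     if not options:
--         return ""
--
--     answer_lower = answer.lower()
--
--     # Direct match
--     for option in options:
--         if answer_lower == option.lower():
--             return option
--
--     # Partial match
--     for option in options:
--         if answer_lower in option.lower() or option.lower() in answer_lower:
--             return option
--
--     # Fallback to first option if no match
--     return options[0] if options else ""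
-- ===== SOURCE B (Python) =====
-- from typing import List
--
-- def _find_best_option_match(answer: str, options: List[str]) -> str:
--     """Score each option (0 exact, 1 partial, 2 none) and return the stable argmin."""
--     if not options:
--         return ""
--     answer_lower = answer.lower()
--
--     def rank(option: str) -> int:
--         option_lower = option.lower()
--         if answer_lower == option_lower:
--             return 0
--         if answer_lower in option_lower or option_lower in answer_lower:
--             return 1
--         return 2
--
--     return min(options, key=rank)
-- ===== Notes on version B (the rewrite author's own statement) =====
-- stated objective: alternative
-- what changed: Replaces A's staged scans with early return by a rank function (0 exact, 1 partial, 2 none) and a single stable min-by-key selection over the options.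
import Mathlib
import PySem

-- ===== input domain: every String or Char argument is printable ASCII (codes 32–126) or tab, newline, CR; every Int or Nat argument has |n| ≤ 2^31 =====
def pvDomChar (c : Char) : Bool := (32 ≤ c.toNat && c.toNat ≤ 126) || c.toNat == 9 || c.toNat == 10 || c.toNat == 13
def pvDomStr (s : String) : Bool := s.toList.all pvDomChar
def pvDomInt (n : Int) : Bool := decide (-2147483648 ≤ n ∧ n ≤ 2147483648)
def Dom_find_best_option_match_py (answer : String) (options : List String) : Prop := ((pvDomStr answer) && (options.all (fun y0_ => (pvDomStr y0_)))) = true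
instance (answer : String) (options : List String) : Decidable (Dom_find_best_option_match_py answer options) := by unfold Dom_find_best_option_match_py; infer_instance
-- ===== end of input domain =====

-- B selects the option by a rank function and one stable min-by-key, instead of A's staged scans with early return.

-- ===== PORT A =====
-- A's two for-loops with early return, ported as List.find? (first element satisfying the test).
def find_best_option_match_py (answer : String) (options : List String) : String :=
  if options = [] then "" else
  let answer_lower := PySem.Str.lower answer
  match options.find? (fun option => answer_lower == PySem.Str.lower option) with
  | some option => option
  | none =>
    match options.find? (fun option =>
        PySem.Str.isIn answer_lower (PySem.Str.lower option) ||
        PySem.Str.isIn (PySem.Str.lower option) answer_lower) with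
    | some option => option
    | none => match options with | [] => "" | o :: _ => o

-- ===== PORT B =====
-- Source B's rank key: 0 exact, 1 partial, 2 no match.
def pvRank (answer_lower : String) (option : String) : Nat :=
  let option_lower := PySem.Str.lower option
  if answer_lower == option_lower then 0
  else if PySem.Str.isIn answer_lower option_lower || PySem.Str.isIn option_lower answer_lower then 1
  else 2

-- Source B: min(options, key=rank) — PySem.List.min? is Python's stable min-by-key.
def find_best_option_match_py_alt (answer : String) (options : List String) : String :=
  if options = [] then "" else
  let answer_lower := PySem.Str.lower answer
  match PySem.List.min? options (pvRank answer_lower) with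
  | some o => o
  | none => ""

-- ===== PRECONDITION & SPEC =====
def Spec_find_best_option_match_py (answer : String) (options : List String) (out : String) : Prop := out = find_best_option_match_py_alt answer options
instance (answer : String) (options : List String) (out : String) : Decidable (Spec_find_best_option_match_py answer options out) := by unfold Spec_find_best_option_match_py; infer_instance

-- ===== CLAIM =====
def Claim_equal_find_best_option_match_py : Prop := ∀ (answer : String) (options : List String), Dom_find_best_option_match_py answer options → Spec_find_best_option_match_py answer options (find_best_option_match_py answer options)

-- ===== LEMMAS AND PROOFS =====

def pvStep (al : String) (acc : Option String) (x : String) : Option String :=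
  match acc with
  | none => some x
  | some m => if pvRank al x < pvRank al m then some x else some m

-- the fold inside PySem.List.min?, specialised to the rank key
def pvMinF (al : String) (l : List String) (acc : Option String) : Option String :=
  List.foldl (pvStep al) acc l

theorem pvMinF_cons (al x : String) (t : List String) (acc : Option String) :
    pvMinF al (x :: t) acc = pvMinF al t (pvStep al acc x) := rfl

def pvExact (al : String) (o : String) : Bool := al == PySem.Str.lower o
def pvPart (al : String) (o : String) : Bool :=
  PySem.Str.isIn al (PySem.Str.lower o) || PySem.Str.isIn (PySem.Str.lower o) al

theorem pvRank_exact {al o : String} (h : pvExact al o = true) : pvRank al o = 0 := by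
  simp [pvRank, pvExact] at *; simp [h]

theorem pvRank_part {al o : String} (h1 : pvExact al o = false) (h2 : pvPart al o = true) :
    pvRank al o = 1 := by
  simp [pvRank, pvExact, pvPart] at *; simp [h1, h2]

theorem pvRank_none {al o : String} (h1 : pvExact al o = false) (h2 : pvPart al o = false) :
    pvRank al o = 2 := by
  simp [pvRank, pvExact, pvPart] at *
  simp [h1, h2.1, h2.2]

-- an acc of rank 0 is never replaced
theorem pvMinF_exact (al : String) (l : List String) (m : String)
    (hm : pvExact al m = true) : pvMinF al l (some m) = some m := by
  induction l with
  | nil => rfl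
  | cons x t ih =>
    rw [pvMinF_cons, pvStep, pvRank_exact hm, if_neg (Nat.not_lt_zero _), ih]

-- an acc of rank 1 is replaced exactly by the first exact element
theorem pvMinF_part (al : String) (l : List String) (m : String)
    (h1 : pvExact al m = false) (h2 : pvPart al m = true) :
    pvMinF al l (some m) = some ((l.find? (pvExact al)).getD m) := by
  induction l generalizing m with
  | nil => rfl
  | cons x t ih =>
    rw [pvMinF_cons, pvStep, pvRank_part h1 h2, List.find?]
    cases hx : pvExact al x with
    | true =>
      rw [if_pos (by rw [pvRank_exact hx]; omega)]
      simp [pvMinF_exact al t x hx]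
    | false =>
      cases hpx : pvPart al x with
      | true =>
        rw [pvRank_part hx hpx, if_neg (by omega)]
        simp [ih m h1 h2]
      | false =>
        rw [pvRank_none hx hpx, if_neg (by omega)]
        simp [ih m h1 h2]

-- an acc of rank 2 yields the first exact element, else the first partial, else the acc
theorem pvMinF_none (al : String) (l : List String) (m : String)
    (h1 : pvExact al m = false) (h2 : pvPart al m = false) :
    pvMinF al l (some m) =
      some (((l.find? (pvExact al)).or (l.find? (pvPart al))).getD m) := by
  induction l generalizing m with
  | nil => rfl
  | cons x t ih =>
    rw [pvMinF_cons, pvStep, pvRank_none h1 h2]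
    simp only [List.find?]
    cases hx : pvExact al x with
    | true =>
      rw [if_pos (by rw [pvRank_exact hx]; omega)]
      simp [pvMinF_exact al t x hx]
    | false =>
      cases hpx : pvPart al x with
      | true =>
        rw [pvRank_part hx hpx, if_pos (by omega)]
        rw [pvMinF_part al t x hx hpx]
        cases he : t.find? (pvExact al) <;> simp [Option.or]
      | false =>
        rw [pvRank_none hx hpx, if_neg (by omega)]
        simp [ih m h1 h2]

-- ===== VERDICT =====
theorem find_best_option_match_py_spec : Claim_equal_find_best_option_match_py := by
  unfold Claim_equal_find_best_option_match_py
  intro answer options _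
  unfold Spec_find_best_option_match_py find_best_option_match_py find_best_option_match_py_alt
  cases options with
  | nil => rfl
  | cons o t =>
    simp only [reduceCtorEq, if_false]
    have hE : (fun option => PySem.Str.lower answer == PySem.Str.lower option)
        = pvExact (PySem.Str.lower answer) := rfl
    have hP : (fun option => PySem.Str.isIn (PySem.Str.lower answer) (PySem.Str.lower option)
        || PySem.Str.isIn (PySem.Str.lower option) (PySem.Str.lower answer))
        = pvPart (PySem.Str.lower answer) := rfl
    rw [hE, hP]
    have hmin : PySem.List.min? (o :: t) (pvRank (PySem.Str.lower answer))
        = pvMinF (PySem.Str.lower answer) t (some o) := by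
      unfold PySem.List.min? pvMinF
      rw [List.foldl_cons]
      congr 1
      funext acc x
      cases acc <;> rfl
    rw [hmin]
    simp only [List.find?]
    cases ho : pvExact (PySem.Str.lower answer) o with
    | true => rw [pvMinF_exact _ t o ho]
    | false =>
      cases hpo : pvPart (PySem.Str.lower answer) o with
      | true =>
        rw [pvMinF_part _ t o ho hpo]
        cases he : t.find? (pvExact (PySem.Str.lower answer)) <;> simp
      | false =>
        rw [pvMinF_none _ t o ho hpo]
        cases he : t.find? (pvExact (PySem.Str.lower answer)) <;>
          cases hp : t.find? (pvPart (PySem.Str.lower answer)) <;>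
          simp [Option.or]
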